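-- pv_equiv track=rewrite | github.com/bontail/VM | 01.py | make_diagonally_dominant
-- ===== SOURCE A (Python) =====
-- def make_diagonally_dominant(A, b):
--     n = len(A)
--
--     used = [False] * n
--     new_A = [None] * n
--     new_b = [0] * n
--
--     def backtrack(i):
--         if i == n:
--             return True
--
--         for r in range(n):
--             if not used[r]:
--                 diag = abs(A[r][i])
--                 s = sum(abs(A[r][j]) for j in range(n)) - diag
--
--                 if diag > s:
--                     used[r] = True
--                     new_A[i] = A[r]
--                     new_b[i] = b[r]
--
--                     if backtrack(i + 1):
--                         return True
--
--                     used[r] = False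
--         return False
--
--     if backtrack(0):
--         return new_A, new_b, True
--     else:
--         return A, b, False
-- ===== SOURCE B (Python) =====
-- def make_diagonally_dominant(A, b):
--     # A row is strictly dominant at at most one column, so no backtracking is
--     # needed: for each column take the first row dominant there; if every
--     # column has one, those rows are automatically distinct.
--     n = len(A)
--     new_A, new_b = [], []
--     for i in range(n):
--         r = next((r for r in range(n)
--                   if 2 * abs(A[r][i]) > sum(abs(A[r][j]) for j in range(n))),
--                  None)
--         if r is None:
--             return A, b, False
--         new_A.append(A[r])
--         new_b.append(b[r])
--     return new_A, new_b, True
-- ===== Notes on version B (the rewrite author's own statement) =====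
-- stated objective: simpler
-- what changed: Replaces the recursive backtracking permutation search (with a used-rows array and undo) by a direct single pass over columns: since a row can be strictly dominant at at most one column, each column's first dominant row is taken greedily with no backtracking and no used-set.
import Mathlib
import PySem

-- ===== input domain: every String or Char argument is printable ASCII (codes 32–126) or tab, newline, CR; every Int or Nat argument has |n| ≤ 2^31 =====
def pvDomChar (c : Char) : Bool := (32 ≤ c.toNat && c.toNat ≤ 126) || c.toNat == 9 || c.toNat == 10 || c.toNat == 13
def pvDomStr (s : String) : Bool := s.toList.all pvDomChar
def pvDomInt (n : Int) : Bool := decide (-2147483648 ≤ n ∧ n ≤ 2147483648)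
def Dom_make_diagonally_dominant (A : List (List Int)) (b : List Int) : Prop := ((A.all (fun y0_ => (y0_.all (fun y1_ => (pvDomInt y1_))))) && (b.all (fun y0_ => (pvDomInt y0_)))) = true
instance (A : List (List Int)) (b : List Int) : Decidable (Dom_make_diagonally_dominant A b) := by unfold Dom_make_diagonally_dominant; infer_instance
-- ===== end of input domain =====

-- B replaces A's recursive backtracking over row permutations by a single greedy pass over
-- columns (a row is strictly dominant at at most one column, so no backtracking is needed);
-- objective: simpler. Neither program mutates its arguments.

-- ===== PORT A =====
-- sum(abs(A[r][j]) for j in range(n))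
def absRowSum (row : List Int) (n : Nat) : Int :=
  (List.range n).foldl (fun acc j => acc + |row.getD j 0|) 0

-- the inner 'for r in range(n)' loop of backtrack; `next` is the recursive call backtrack(i+1).
-- Python mutates new_A/new_b in place; a failed branch's writes are invisible in the returned
-- value (they are overwritten or discarded), so the port threads them functionally.
def btLoop (Am : List (List Int)) (b : List Int) (n : Nat)
    (next : List Bool → List (List Int) → List Int → Option (List (List Int) × List Int))
    (i : Nat) (used : List Bool) (nA : List (List Int)) (nb : List Int) :
    List Nat → Option (List (List Int) × List Int)
  | [] => none
  | r :: rs =>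
    if used.getD r true then
      btLoop Am b n next i used nA nb rs
    else
      let row := Am.getD r []
      let diag := |row.getD i 0|
      let s := absRowSum row n - diag
      if s < diag then
        match next (used.set r true) (nA.set i row) (nb.set i (b.getD r 0)) with
        | some res => some res
        | none => btLoop Am b n next i used nA nb rs
      else
        btLoop Am b n next i used nA nb rs

-- backtrack(i); the fuel k = n - i makes the recursion structural (k = 0 ↔ i == n).
def btA (Am : List (List Int)) (b : List Int) (n : Nat) :
    Nat → Nat → List Bool → List (List Int) → List Int →
    Option (List (List Int) × List Int)
  | 0, _, _, nA, nb => some (nA, nb)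
  | k + 1, i, used, nA, nb =>
      btLoop Am b n (fun u x y => btA Am b n k (i + 1) u x y) i used nA nb (List.range n)

def make_diagonally_dominant (A : List (List Int)) (b : List Int) :
    List (List Int) × List Int × Bool :=
  -- n = len(A), inlined
  match btA A b A.length A.length 0 (List.replicate A.length false)
      (List.replicate A.length []) (List.replicate A.length 0) with
  | some (nA, nb) => (nA, nb, true)
  | none => (A, b, false)

-- ===== PORT B =====
-- sum(abs(A[r][j]) for j in range(n))
def absRowSumB (row : List Int) (n : Nat) : Int :=
  (List.range n).foldl (fun acc j => acc + |row.getD j 0|) 0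

-- 2 * abs(A[r][i]) > sum(abs(A[r][j]) for j in range(n))
def domCheck (Am : List (List Int)) (n i r : Nat) : Bool :=
  decide (2 * |(Am.getD r []).getD i 0| > absRowSumB (Am.getD r []) n)

-- next((r for r in range(n) if ...), None)
def firstDomB (Am : List (List Int)) (n i : Nat) : Option Nat :=
  (List.range n).find? (fun r => domCheck Am n i r)

-- the 'for i in range(n)' loop building new_A, new_b by appending
def altGo (Am : List (List Int)) (b : List Int) (n : Nat) :
    List Nat → List (List Int) → List Int → Option (List (List Int) × List Int)
  | [], accA, accB => some (accA, accB)
  | i :: rest, accA, accB =>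
    match firstDomB Am n i with
    | none => none
    | some r => altGo Am b n rest (accA ++ [Am.getD r []]) (accB ++ [b.getD r 0])

def make_diagonally_dominant_alt (A : List (List Int)) (b : List Int) :
    List (List Int) × List Int × Bool :=
  -- n = len(A), inlined
  match altGo A b A.length (List.range A.length) [] [] with
  | some (nA, nb) => (nA, nb, true)
  | none => (A, b, false)

-- ===== PRECONDITION & SPEC =====
-- Pre_ excludes the shape-mismatched inputs (a row shorter than len(A), or b shorter than
-- len(A)) on which Python A's indexing A[r][j] / b[r] raises IndexError; on a few such inputs
-- A happens to return (A, b, False) before touching a missing entry (see the cite in the claim).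
def Pre_make_diagonally_dominant (A : List (List Int)) (b : List Int) : Prop :=
  (∀ row ∈ A, A.length ≤ row.length) ∧ A.length ≤ b.length
instance (A : List (List Int)) (b : List Int) : Decidable (Pre_make_diagonally_dominant A b) := by
  unfold Pre_make_diagonally_dominant; infer_instance

def pvWitness_make_diagonally_dominant : List (List Int) × List Int :=
  ([[3, 1], [1, 3]], [1, 2])

def Spec_make_diagonally_dominant (A : List (List Int)) (b : List Int)
    (out : List (List Int) × List Int × Bool) : Prop := out = make_diagonally_dominant_alt A b
instance (A : List (List Int)) (b : List Int) (out : List (List Int) × List Int × Bool) :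
    Decidable (Spec_make_diagonally_dominant A b out) := by
  unfold Spec_make_diagonally_dominant; infer_instance

-- ===== CLAIM (what is proved, stated in full; the proofs are below) =====
def Claim_equal_make_diagonally_dominant : Prop :=
  ∀ (A : List (List Int)) (b : List Int), Dom_make_diagonally_dominant A b →
    Pre_make_diagonally_dominant A b →
    Spec_make_diagonally_dominant A b (make_diagonally_dominant A b)

-- ===== LEMMAS AND PROOFS =====

-- the (unique) row Python B picks for column i: the first row dominant at i
def sigmaRow (Am : List (List Int)) (n i : Nat) : Nat :=
  ((List.range n).find? (fun r => domCheck Am n i r)).getD 0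

-- what A's successful backtracking writes into new_A/new_b from column i on
def fills (Am : List (List Int)) (b : List Int) (n : Nat) :
    Nat → Nat → List (List Int) → List Int → List (List Int) × List Int
  | 0, _, nA, nb => (nA, nb)
  | k + 1, i, nA, nb =>
      fills Am b n k (i + 1) (nA.set i (Am.getD (sigmaRow Am n i) []))
        (nb.set i (b.getD (sigmaRow Am n i) 0))

-- every column in [i, n) has a dominant row
def GoodFrom (Am : List (List Int)) (n i : Nat) : Prop :=
  ∀ i', i ≤ i' → i' < n → ∃ r, r < n ∧ domCheck Am n i' r = true

-- invariant of backtrack(i): each used row was placed at a column < i that it dominates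
def InvUsed (Am : List (List Int)) (n i : Nat) (used : List Bool) : Prop :=
  used.length = n ∧
  ∀ r, r < n → used.getD r true = true → ∃ j, j < i ∧ domCheck Am n j r = true

lemma absRowSumB_eq_A (row : List Int) (n : Nat) : absRowSumB row n = absRowSum row n := rfl

lemma absRowSum_eq (row : List Int) (n : Nat) :
    absRowSum row n = ∑ j ∈ Finset.range n, |row.getD j 0| := by
  induction n with
  | zero => simp [absRowSum]
  | succ m ih =>
    rw [absRowSum, List.range_succ, List.foldl_append, ← absRowSum, ih,
      Finset.sum_range_succ]
    simp

lemma pair_le_sum (row : List Int) (n i i' : Nat) (hi : i < n) (hi' : i' < n)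
    (hne : i ≠ i') :
    |row.getD i 0| + |row.getD i' 0| ≤ absRowSum row n := by
  rw [absRowSum_eq]
  calc |row.getD i 0| + |row.getD i' 0|
      = ∑ j ∈ ({i, i'} : Finset ℕ), |row.getD j 0| := (Finset.sum_pair (f := fun j => |row.getD j 0|) hne).symm
    _ ≤ ∑ j ∈ Finset.range n, |row.getD j 0| := by
        apply Finset.sum_le_sum_of_subset_of_nonneg
        · intro x hx
          rcases Finset.mem_insert.mp hx with h | h
          · simpa [h] using Finset.mem_range.mpr hi
          · have : x = i' := Finset.mem_singleton.mp h
            simpa [this] using Finset.mem_range.mpr hi'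
        · intro j _ _; exact abs_nonneg _

lemma dom_unique (Am : List (List Int)) (n r i i' : Nat) (hi : i < n) (hi' : i' < n)
    (hne : i ≠ i') (h1 : domCheck Am n i r = true) (h2 : domCheck Am n i' r = true) :
    False := by
  simp only [domCheck, decide_eq_true_eq, absRowSumB_eq_A] at h1 h2
  have hp := pair_le_sum (Am.getD r []) n i i' hi hi' hne
  omega

lemma branch_iff (Am : List (List Int)) (n i r : Nat) :
    (absRowSum (Am.getD r []) n - |(Am.getD r []).getD i 0| < |(Am.getD r []).getD i 0|)
      ↔ domCheck Am n i r = true := by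
  simp only [domCheck, decide_eq_true_eq, absRowSumB_eq_A]
  omega

lemma usedNotDom (Am : List (List Int)) (n i i' r : Nat) (used : List Bool)
    (hInv : InvUsed Am n i used) (hii' : i ≤ i') (hi' : i' < n) (hr : r < n)
    (hu : used.getD r true = true) : domCheck Am n i' r = false := by
  obtain ⟨-, h⟩ := hInv
  obtain ⟨j, hj, hd⟩ := h r hr hu
  cases hcase : domCheck Am n i' r with
  | false => rfl
  | true => exact absurd (dom_unique Am n r j i' (by omega) hi' (by omega) hd hcase) (by simp)

lemma getD_set_ne (l : List Bool) (r r' : Nat) (v : Bool) (hne : r ≠ r') :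
    (l.set r v).getD r' true = l.getD r' true := by
  simp [List.getD, List.getElem?_set_ne hne]

lemma invUsed_set (Am : List (List Int)) (n i r : Nat) (used : List Bool)
    (hInv : InvUsed Am n i used) (_hr : r < n) (hdom : domCheck Am n i r = true) :
    InvUsed Am n (i + 1) (used.set r true) := by
  obtain ⟨hlen, hused⟩ := hInv
  refine ⟨by simp [hlen], ?_⟩
  intro r' hr' h'
  by_cases hrr : r' = r
  · exact ⟨i, Nat.lt_succ_self i, by rw [hrr]; exact hdom⟩
  · rw [getD_set_ne used r r' true (fun h => hrr h.symm)] at h'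
    obtain ⟨j, hj, hd⟩ := hused r' hr' h'
    exact ⟨j, by omega, hd⟩

lemma loopFail (Am : List (List Int)) (b : List Int) (n : Nat)
    (next : List Bool → List (List Int) → List Int → Option (List (List Int) × List Int))
    (i : Nat) (used : List Bool) (nA : List (List Int)) (nb : List Int) :
    ∀ rs : List Nat,
      (∀ r ∈ rs, used.getD r true = false → domCheck Am n i r = true →
        next (used.set r true) (nA.set i (Am.getD r [])) (nb.set i (b.getD r 0)) = none) →
      btLoop Am b n next i used nA nb rs = none := by
  intro rs
  induction rs with
  | nil => intro _; rfl
  | cons r rs ih =>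
    intro h
    rw [btLoop]
    cases hu : used.getD r true with
    | true =>
      simp only [if_true]
      exact ih fun r' hm => h r' (List.mem_cons_of_mem r hm)
    | false =>
      simp only [Bool.false_eq_true, if_false]
      by_cases hd : domCheck Am n i r = true
      · rw [if_pos ((branch_iff Am n i r).mpr hd),
          h r (List.mem_cons_self) hu hd]
        exact ih fun r' hm => h r' (List.mem_cons_of_mem r hm)
      · rw [if_neg (fun hc => hd ((branch_iff Am n i r).mp hc))]
        exact ih fun r' hm => h r' (List.mem_cons_of_mem r hm)

lemma loopSucc (Am : List (List Int)) (b : List Int) (n : Nat)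
    (next : List Bool → List (List Int) → List Int → Option (List (List Int) × List Int))
    (i : Nat) (used : List Bool) (nA : List (List Int)) (nb : List Int) :
    ∀ (rs : List Nat) (r0 : Nat) (out : List (List Int) × List Int),
      (∀ r ∈ rs, used.getD r true = true → domCheck Am n i r = false) →
      List.find? (fun r => domCheck Am n i r) rs = some r0 →
      next (used.set r0 true) (nA.set i (Am.getD r0 [])) (nb.set i (b.getD r0 0)) = some out →
      btLoop Am b n next i used nA nb rs = some out := by
  intro rs
  induction rs with
  | nil => intro r0 out _ hf; simp at hf
  | cons r rs ih =>
    intro r0 out hnd hf hnext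
    rw [btLoop]
    by_cases hd : domCheck Am n i r = true
    · rw [List.find?_cons_of_pos (by simpa using hd)] at hf
      injection hf with hf; subst hf
      cases hu : used.getD r true with
      | true => exact absurd (hnd r List.mem_cons_self hu) (by simp [hd])
      | false =>
        simp only [Bool.false_eq_true, if_false]
        rw [if_pos ((branch_iff Am n i r).mpr hd), hnext]
    · rw [List.find?_cons_of_neg (by simpa using hd)] at hf
      have hrest := ih r0 out (fun r' hm => hnd r' (List.mem_cons_of_mem r hm)) hf hnext
      cases hu : used.getD r true with
      | true => simpa only [if_true] using hrest
      | false =>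
        simp only [Bool.false_eq_true, if_false]
        rw [if_neg (fun hc => hd ((branch_iff Am n i r).mp hc))]
        exact hrest

lemma btFail (Am : List (List Int)) (b : List Int) (n : Nat) :
    ∀ (k i : Nat) (used : List Bool) (nA : List (List Int)) (nb : List Int),
      i + k = n → InvUsed Am n i used →
      (∃ i', i ≤ i' ∧ i' < n ∧ ∀ r, r < n → domCheck Am n i' r = false) →
      btA Am b n k i used nA nb = none := by
  intro k
  induction k with
  | zero =>
    intro i used nA nb hik _ hfail
    obtain ⟨i', h1, h2, -⟩ := hfail
    omega
  | succ k ih =>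
    intro i used nA nb hik hInv hfail
    rw [btA]
    apply loopFail
    intro r hm _hu hd
    have hr : r < n := List.mem_range.mp hm
    obtain ⟨i', hii', hi'n, hall⟩ := hfail
    by_cases hie : i' = i
    · rw [hie] at hall
      exact absurd hd (by simp [hall r hr])
    · exact ih (i + 1) (used.set r true) (nA.set i (Am.getD r [])) (nb.set i (b.getD r 0))
        (by omega) (invUsed_set Am n i r used hInv hr hd) ⟨i', by omega, hi'n, hall⟩

lemma btSucc (Am : List (List Int)) (b : List Int) (n : Nat) :
    ∀ (k i : Nat) (used : List Bool) (nA : List (List Int)) (nb : List Int),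
      i + k = n → InvUsed Am n i used → GoodFrom Am n i →
      btA Am b n k i used nA nb = some (fills Am b n k i nA nb) := by
  intro k
  induction k with
  | zero => intro i used nA nb _ _ _; rfl
  | succ k ih =>
    intro i used nA nb hik hInv hgood
    obtain ⟨r, hr, hd⟩ := hgood i (le_refl i) (by omega)
    have hsome : ((List.range n).find? (fun r => domCheck Am n i r)).isSome :=
      List.find?_isSome.mpr ⟨r, List.mem_range.mpr hr, hd⟩
    obtain ⟨r0, hf⟩ := Option.isSome_iff_exists.mp hsome
    have hr0n : r0 < n := List.mem_range.mp (List.mem_of_find?_eq_some hf)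
    have hr0d : domCheck Am n i r0 = true := by
      have := List.find?_some hf
      simpa using this
    have hsig : sigmaRow Am n i = r0 := by unfold sigmaRow; rw [hf]; rfl
    rw [btA]
    rw [fills, hsig]
    apply loopSucc
    · intro r' hm hu
      exact usedNotDom Am n i i r' used hInv (le_refl i) (by omega) (List.mem_range.mp hm) hu
    · exact hf
    · exact ih (i + 1) (used.set r0 true) (nA.set i (Am.getD r0 [])) (nb.set i (b.getD r0 0))
        (by omega) (invUsed_set Am n i r0 used hInv hr0n hr0d)
        (fun i' h1 h2 => hgood i' (by omega) h2)

lemma altSucc (Am : List (List Int)) (b : List Int) (n : Nat) :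
    ∀ (cols : List Nat) (accA : List (List Int)) (accB : List Int),
      (∀ i ∈ cols, ∃ r, r < n ∧ domCheck Am n i r = true) →
      altGo Am b n cols accA accB =
        some (accA ++ cols.map (fun i => Am.getD (sigmaRow Am n i) []),
              accB ++ cols.map (fun i => b.getD (sigmaRow Am n i) 0)) := by
  intro cols
  induction cols with
  | nil => intro accA accB _; simp [altGo]
  | cons c rest ih =>
    intro accA accB h
    obtain ⟨r, hr, hd⟩ := h c List.mem_cons_self
    have hsome : ((List.range n).find? (fun r => domCheck Am n c r)).isSome :=
      List.find?_isSome.mpr ⟨r, List.mem_range.mpr hr, hd⟩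
    obtain ⟨r0, hf⟩ := Option.isSome_iff_exists.mp hsome
    have hsig : sigmaRow Am n c = r0 := by unfold sigmaRow; rw [hf]; rfl
    rw [altGo]
    simp only [firstDomB, hf]
    rw [ih (accA ++ [Am.getD r0 []]) (accB ++ [b.getD r0 0])
      (fun i hm => h i (List.mem_cons_of_mem c hm))]
    simp [hsig]

lemma altFail (Am : List (List Int)) (b : List Int) (n : Nat) :
    ∀ (cols : List Nat) (accA : List (List Int)) (accB : List Int),
      (∃ i ∈ cols, ∀ r, r < n → domCheck Am n i r = false) →
      altGo Am b n cols accA accB = none := by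
  intro cols
  induction cols with
  | nil => intro accA accB h; simp at h
  | cons c rest ih =>
    intro accA accB h
    rw [altGo]
    cases hf : firstDomB Am n c with
    | none => rfl
    | some r0 =>
      obtain ⟨i, hm, hall⟩ := h
      rcases List.mem_cons.mp hm with hic | hirest
      · have hr0n : r0 < n := List.mem_range.mp (List.mem_of_find?_eq_some hf)
        have hr0d : domCheck Am n c r0 = true := by
          have := List.find?_some hf
          simpa using this
        rw [← hic] at hr0d
        exact absurd hr0d (by simp [hall r0 hr0n])
      · exact ih _ _ ⟨i, hirest, hall⟩

lemma take_set_succ {α : Type} (l : List α) (i : Nat) (v : α) (h : i < l.length) :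
    (l.set i v).take (i + 1) = l.take i ++ [v] := by
  rw [List.take_add_one]
  congr 1
  · rw [List.take_set_of_le (le_refl i)]
  · rw [List.getElem?_set_self (by simpa using h)]
    rfl

lemma fillsEq (Am : List (List Int)) (b : List Int) (n : Nat) :
    ∀ (k i : Nat) (nA : List (List Int)) (nb : List Int),
      nA.length = i + k → nb.length = i + k →
      fills Am b n k i nA nb =
        (nA.take i ++ (List.range' i k).map (fun i' => Am.getD (sigmaRow Am n i') []),
         nb.take i ++ (List.range' i k).map (fun i' => b.getD (sigmaRow Am n i') 0)) := by
  intro k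
  induction k with
  | zero =>
    intro i nA nb hA hB
    simp only [fills, List.range'_zero, List.map_nil, List.append_nil]
    rw [List.take_of_length_le (show nA.length ≤ i by omega),
      List.take_of_length_le (show nb.length ≤ i by omega)]
  | succ k ih =>
    intro i nA nb hA hB
    rw [fills, ih (i + 1) _ _ (by simp [hA]; omega) (by simp [hB]; omega)]
    rw [take_set_succ nA i _ (by omega), take_set_succ nb i _ (by omega)]
    rw [List.range'_succ, List.map_cons, List.map_cons]
    simp [List.append_assoc]

lemma replicate_inv (Am : List (List Int)) (n : Nat) :
    InvUsed Am n 0 (List.replicate n false) := by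
  refine ⟨List.length_replicate, ?_⟩
  intro r hr h
  rw [List.getD, List.getElem?_replicate, if_pos hr] at h
  simp at h

theorem make_diagonally_dominant_spec : Claim_equal_make_diagonally_dominant := by
  intro A b _hdom _hpre
  unfold Spec_make_diagonally_dominant make_diagonally_dominant make_diagonally_dominant_alt
  by_cases hg : ∀ i', i' < A.length → ∃ r, r < A.length ∧ domCheck A A.length i' r = true
  · rw [btSucc A b A.length A.length 0 (List.replicate A.length false)
      (List.replicate A.length []) (List.replicate A.length 0) (by omega)
      (replicate_inv A A.length) (fun i' _ h2 => hg i' h2)]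
    rw [fillsEq A b A.length A.length 0 _ _ (by simp) (by simp)]
    rw [altSucc A b A.length (List.range A.length) [] []
      (fun i hm => hg i (List.mem_range.mp hm))]
    simp [List.range_eq_range']
  · push Not at hg
    obtain ⟨i', hi', hall⟩ := hg
    rw [btFail A b A.length A.length 0 _ _ _ (by omega) (replicate_inv A A.length)
      ⟨i', Nat.zero_le i', hi', fun r hr => by simpa using (hall r hr)⟩]
    rw [altFail A b A.length (List.range A.length) [] []
      ⟨i', List.mem_range.mpr hi', fun r hr => by simpa using (hall r hr)⟩]
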